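-- pv_equiv track=rewrite | github.com/educating-dip/diffusion_models_dev_project | src/samplers/utils.py | _schedule_jump
-- ===== SOURCE A (Python) =====
-- def _check_times(times, t_0, num_steps):
--
--     assert times[0] > times[1], (times[0], times[1])
--
--     assert times[-1] == -1, times[-1]
--
--     for t_last, t_cur in zip(times[:-1], times[1:]):
--         assert abs(t_last - t_cur) == 1, (t_last, t_cur)
--
--     for t in times:
--         assert t >= t_0, (t, t_0)
--         assert t <= num_steps, (t, num_steps)
--
-- def _schedule_jump(num_steps, travel_length, travel_repeat):
--     jumps = {}
--     for j in range(0, num_steps - travel_length, travel_length):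
--         jumps[j] = travel_repeat - 1
--
--     t = num_steps
--     time_steps = []
--     while t >= 1:
--         t = t-1
--         time_steps.append(t)
--         if jumps.get(t, 0) > 0:
--             jumps[t] = jumps[t] - 1
--             for _ in range(travel_length):
--                 t = t + 1
--                 time_steps.append(t)
--     time_steps.append(-1)
--     _check_times(time_steps, -1, num_steps)
--
--     return time_steps
-- ===== SOURCE B (Python) =====
-- def _schedule_jump(num_steps, travel_length, travel_repeat):
--     # Single structured descending pass: at each jump point the repeat
--     # excursions are emitted inline instead of mutating a counter dict and
--     # letting the outer while-loop re-descend and re-trigger the point.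
--     jump_points = set(range(0, num_steps - travel_length, travel_length))
--     time_steps = []
--     for t in range(num_steps - 1, -1, -1):
--         time_steps.append(t)
--         if t in jump_points:
--             for _ in range(travel_repeat - 1):
--                 for s in range(t + 1, t + travel_length + 1):
--                     time_steps.append(s)
--                 for s in range(t + travel_length - 1, t - 1, -1):
--                     time_steps.append(s)
--     time_steps.append(-1)
--     return time_steps
-- ===== Notes on version B (the rewrite author's own statement) =====
-- stated objective: simpler
-- what changed: B replaces A's dict of mutable per-jump-point counters (whose outer while-loop must re-descend into each jump point to re-trigger it travel_repeat-1 times, consulting the dict on every iteration) by a single structured descending for-loop that, at each member of a jump-point set built once, emits all climb-and-redescend excursions inline via explicit nested repeat loops.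
import Mathlib
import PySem

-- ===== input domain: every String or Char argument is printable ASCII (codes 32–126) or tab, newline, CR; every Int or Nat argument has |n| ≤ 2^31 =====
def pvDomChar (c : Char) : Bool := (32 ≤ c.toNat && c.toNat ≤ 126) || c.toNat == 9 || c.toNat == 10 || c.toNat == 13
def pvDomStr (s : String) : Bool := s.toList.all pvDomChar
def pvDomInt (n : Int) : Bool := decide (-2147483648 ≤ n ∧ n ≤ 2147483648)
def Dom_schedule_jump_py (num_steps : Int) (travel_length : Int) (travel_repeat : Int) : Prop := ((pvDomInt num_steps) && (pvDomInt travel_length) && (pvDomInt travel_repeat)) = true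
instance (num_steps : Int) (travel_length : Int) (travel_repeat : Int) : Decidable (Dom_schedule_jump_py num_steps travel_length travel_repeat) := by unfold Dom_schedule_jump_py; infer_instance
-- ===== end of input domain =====

-- B builds the jump schedule in one structured descending pass (explicit nested repeat
-- loops at each jump point) instead of A's dict of mutable counters re-triggered by the
-- re-descending while-loop; objective: simpler.

-- ===== PORT A =====
-- A's while-loop, ported with a fuel parameter (the fuel chosen in schedule_jump_py is
-- proved sufficient on Pre_ by the lemmas below: the loop result equals pvBRec).
def pvALoop (L : Int) : Nat → Int → PySem.Dict Int Int → List Int → List Int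
  | 0, _, _, acc => acc
  | fuel+1, t, jumps, acc =>
    if t ≥ 1 then
      let t1 := t - 1
      let acc1 := acc ++ [t1]
      if jumps.getD t1 0 > 0 then
        let jumps1 := jumps.insert t1 (jumps.getD t1 0 - 1)
        let st := (PySem.List.pyRange 0 L 1).foldl
          (fun (st : Int × List Int) _ => (st.1 + 1, st.2 ++ [st.1 + 1])) (t1, acc1)
        pvALoop L fuel st.1 jumps1 st.2
      else pvALoop L fuel t1 jumps acc1
    else acc

-- _check_times only asserts; on Pre_ every assert holds, so it does not affect the value.
def schedule_jump_py (num_steps : Int) (travel_length : Int) (travel_repeat : Int) : List Int :=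
  let jumps := (PySem.List.pyRange 0 (num_steps - travel_length) travel_length).foldl
      (fun (d : PySem.Dict Int Int) j => d.insert j (travel_repeat - 1)) PySem.Dict.empty
  (pvALoop travel_length
      (num_steps.toNat * ((travel_repeat - 1).toNat * travel_length.toNat + 1))
      num_steps jumps []) ++ [-1]

-- ===== PORT B =====
def schedule_jump_py_alt (num_steps : Int) (travel_length : Int) (travel_repeat : Int) : List Int :=
  let jump_points : PySem.Set Int :=
    PySem.Set.ofList (PySem.List.pyRange 0 (num_steps - travel_length) travel_length)
  let time_steps :=
    (PySem.List.pyRange (num_steps - 1) (-1) (-1)).foldl (fun acc t =>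
      let acc1 := acc ++ [t]
      if PySem.Set.contains jump_points t then
        (PySem.List.pyRange 0 (travel_repeat - 1) 1).foldl (fun acc2 _ =>
          (PySem.List.pyRange (t + travel_length - 1) (t - 1) (-1)).foldl (fun a s => a ++ [s])
            ((PySem.List.pyRange (t + 1) (t + travel_length + 1) 1).foldl (fun a s => a ++ [s]) acc2)) acc1
      else acc1) []
  time_steps ++ [-1]

-- ===== PRECONDITION & SPEC =====
-- Pre_ excludes exactly the inputs on which A raises: travel_length == 0 (range() raises
-- ValueError) and num_steps ≤ 0 (the schedule is just [-1] and _check_times raises IndexError).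
def Pre_schedule_jump_py (num_steps : Int) (travel_length : Int) (travel_repeat : Int) : Prop :=
  1 ≤ num_steps ∧ travel_length ≠ 0
instance (num_steps : Int) (travel_length : Int) (travel_repeat : Int) : Decidable (Pre_schedule_jump_py num_steps travel_length travel_repeat) := by unfold Pre_schedule_jump_py; infer_instance

def pvWitness_schedule_jump_py : Int × Int × Int := (10, 3, 2)

def Spec_schedule_jump_py (num_steps : Int) (travel_length : Int) (travel_repeat : Int) (out : List Int) : Prop := out = schedule_jump_py_alt num_steps travel_length travel_repeat
instance (num_steps : Int) (travel_length : Int) (travel_repeat : Int) (out : List Int) : Decidable (Spec_schedule_jump_py num_steps travel_length travel_repeat out) := by unfold Spec_schedule_jump_py; infer_instance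

-- ===== CLAIM (what is proved, stated in full; the proofs are below) =====
def Claim_equal_schedule_jump_py : Prop := ∀ (num_steps : Int) (travel_length : Int) (travel_repeat : Int), Dom_schedule_jump_py num_steps travel_length travel_repeat → Pre_schedule_jump_py num_steps travel_length travel_repeat → Spec_schedule_jump_py num_steps travel_length travel_repeat (schedule_jump_py num_steps travel_length travel_repeat)


-- ===== LEMMAS AND PROOFS =====

-- The set of jump points, and the pieces both programs emit at a jump point t:
-- the climb t+1 … t+L, the re-descent t+L-1 … t, and c repetitions of climb-then-descent.
def pvJ (n L : Int) : List Int := PySem.List.pyRange 0 (n - L) L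
def pvClimb (t L : Int) : List Int := PySem.List.pyRange (t + 1) (t + L + 1) 1
def pvDesc (t L : Int) : List Int := PySem.List.pyRange (t + L - 1) (t - 1) (-1)
def pvBlock (t L : Int) : List Int := pvClimb t L ++ pvDesc t L
def pvRep (t L : Int) (c : Nat) : List Int := (List.range c).flatMap (fun _ => pvBlock t L)

-- Common reference shape: the schedule emitted while descending from t (recursively).
def pvBRec (n L R : Int) : Nat → List Int
  | 0 => []
  | t+1 => ((t : Int) :: (if (t : Int) ∈ pvJ n L then pvRep (t : Int) L (R - 1).toNat else [])) ++ pvBRec n L R t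

-- Fuel sufficient for A's while-loop from height tN.
def pvNeed (L R : Int) (tN : Nat) : Nat := tN * ((R - 1).toNat * L.toNat + 1)

lemma pvRep_succ (t L : Int) (c : Nat) : pvRep t L (c + 1) = pvBlock t L ++ pvRep t L c := by
  induction c with
  | zero => simp [pvRep]
  | succ k ih =>
    have h2 : pvRep t L (k + 1 + 1) = pvRep t L (k + 1) ++ pvBlock t L := by
      unfold pvRep; rw [List.range_succ, List.flatMap_append]; simp
    have h3 : pvRep t L (k + 1) = pvRep t L k ++ pvBlock t L := by
      unfold pvRep; rw [List.range_succ, List.flatMap_append]; simp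
    rw [h2, ih, List.append_assoc, ← h3, ih]

lemma pvGetD_foldl_insert_const (l : List Int) (d : PySem.Dict Int Int) (c x : Int) :
    (l.foldl (fun (d : PySem.Dict Int Int) j => d.insert j c) d).getD x 0
      = if x ∈ l then c else d.getD x 0 := by
  induction l generalizing d with
  | nil => simp
  | cons a t ih =>
    simp only [List.foldl_cons, ih, PySem.Dict.getD_insert, List.mem_cons]
    by_cases hx : x ∈ t <;> by_cases hxa : x = a <;> simp [hx, hxa]

lemma pvPyRange_nil_of_neg (a b s : Int) (hs : s < 0) (hab : a ≤ b) :
    PySem.List.pyRange a b s = [] := by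
  simp only [PySem.List.pyRange]
  rw [if_neg (by omega), if_neg (by omega), if_neg (by omega)]
  simp

lemma pvPyRange_neg_one_append (a m b : Int) (h1 : b ≤ m) (h2 : m ≤ a) :
    PySem.List.pyRange a b (-1) = PySem.List.pyRange a m (-1) ++ PySem.List.pyRange m b (-1) := by
  rw [PySem.List.pyRange_neg_one_eq_reverse, PySem.List.pyRange_neg_one_eq_reverse,
    PySem.List.pyRange_neg_one_eq_reverse,
    PySem.List.pyRange_one_append (b + 1) (m + 1) (a + 1) (by omega) (by omega)]
  simp

lemma pvFoldRange (k : Nat) : ∀ (t : Int) (acc : List Int),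
    (List.range k).foldl (fun (st : Int × List Int) _ => (st.1 + 1, st.2 ++ [st.1 + 1])) (t, acc)
      = (t + (k : Int), acc ++ (List.range k).map (fun (i : Nat) => t + 1 + (i : Int))) := by
  induction k with
  | zero => simp
  | succ k ih =>
    intro t acc
    rw [List.range_succ, List.foldl_append, ih]
    simp [List.range_succ]
    constructor
    · push_cast; ring
    · push_cast; ring_nf

lemma pvClimbFold (L t : Int) (acc : List Int) :
    (PySem.List.pyRange 0 L 1).foldl
        (fun (st : Int × List Int) _ => (st.1 + 1, st.2 ++ [st.1 + 1])) (t, acc)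
      = (t + (L.toNat : Int), acc ++ pvClimb t L) := by
  rw [PySem.List.pyRange_one, List.foldl_map, pvFoldRange]
  have h0 : (L - 0).toNat = L.toNat := by omega
  have h1 : (t + L + 1 - (t + 1)).toNat = L.toNat := by omega
  unfold pvClimb
  rw [PySem.List.pyRange_one, h0, h1]

lemma pvSeg (L : Int) : ∀ (m : Nat) (t : Int) (d : PySem.Dict Int Int) (acc : List Int) (fuel : Nat),
    0 ≤ t →
    (∀ j : Int, t ≤ j → j < t + (m : Int) → d.getD j 0 ≤ 0) →
    pvALoop L (fuel + m) (t + (m : Int)) d acc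
      = pvALoop L fuel t d (acc ++ PySem.List.pyRange (t + (m : Int) - 1) (t - 1) (-1)) := by
  intro m
  induction m with
  | zero =>
    intro t d acc fuel ht h
    rw [PySem.List.pyRange_neg_one_eq_nil (by omega)]
    norm_num
  | succ m ih =>
    intro t d acc fuel ht h
    have e1 : fuel + (m + 1) = (fuel + m) + 1 := by omega
    have e2 : t + ((m : Int) + 1) - 1 = t + (m : Int) := by ring
    rw [e1, show ((m + 1 : Nat) : Int) = (m : Int) + 1 from by push_cast; ring]
    rw [pvALoop]
    rw [if_pos (by omega : t + ((m : Int) + 1) ≥ 1)]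
    simp only [e2]
    rw [if_neg (by
      have := h (t + (m : Int)) (by omega) (by omega)
      omega)]
    rw [ih t d (acc ++ [t + (m : Int)]) fuel ht (fun j h1 h2 => h j h1 (by omega))]
    rw [PySem.List.pyRange_neg_one_cons (by omega : t - 1 < t + (m : Int))]
    simp

lemma pvNotMemJ_window (n L : Int) (hL : 0 < L) (t1 j : Int) (ht1J : t1 ∈ pvJ n L)
    (h1 : t1 < j) (h2 : j < t1 + L) : j ∉ pvJ n L := by
  intro hj
  rw [pvJ, PySem.List.mem_pyRange_iff_of_pos hL] at ht1J hj
  have d1 : L ∣ t1 - 0 := ht1J.2.2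
  have d2 : L ∣ j - 0 := hj.2.2
  have d3 : L ∣ j - t1 := by
    have := dvd_sub d2 d1
    simpa using this
  have := Int.le_of_dvd (by omega) d3
  omega

lemma pvDesc_split (t1 L : Int) (hL : 0 < L) :
    pvDesc t1 L = PySem.List.pyRange (t1 + L - 1) t1 (-1) ++ [t1] := by
  unfold pvDesc
  rw [pvPyRange_neg_one_append (t1 + L - 1) t1 (t1 - 1) (by omega) (by omega)]
  congr 1
  rw [PySem.List.pyRange_neg_one_cons (by omega : t1 - 1 < t1),
    PySem.List.pyRange_neg_one_eq_nil (by omega)]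

lemma pvSub (n L R : Int) (hL : 0 < L) (t1 : Int) (t1N : Nat) (ht1 : t1 = (t1N : Int))
    (ht1J : t1 ∈ pvJ n L)
    (IH : ∀ (d : PySem.Dict Int Int) (acc : List Int) (fuel : Nat),
        (∀ j : Int, j < t1 → d.getD j 0 = if j ∈ pvJ n L then R - 1 else 0) →
        (∀ j : Int, j ∉ pvJ n L → d.getD j 0 = 0) →
        pvNeed L R t1N ≤ fuel →
        pvALoop L fuel t1 d acc = acc ++ pvBRec n L R t1N) :
    ∀ (c : Nat) (d : PySem.Dict Int Int) (acc : List Int) (fuel : Nat),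
      d.getD t1 0 = (c : Int) →
      (∀ j : Int, j < t1 → d.getD j 0 = if j ∈ pvJ n L then R - 1 else 0) →
      (∀ j : Int, j ∉ pvJ n L → d.getD j 0 = 0) →
      (c + 1) * L.toNat + pvNeed L R t1N ≤ fuel →
      pvALoop L fuel (t1 + L) d acc
        = acc ++ pvDesc t1 L ++ pvRep t1 L c ++ pvBRec n L R t1N := by
  intro c
  induction c with
  | zero =>
    intro d acc fuel hc h1 h2 hf
    have hm : (L - 1).toNat ≤ fuel := by
      have : 1 * L.toNat ≤ fuel := le_trans (by omega) hf
      omega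
    obtain ⟨f, rfl⟩ : ∃ f, fuel = f + (L - 1).toNat := ⟨fuel - (L - 1).toNat, by omega⟩
    have hcast : (((L - 1).toNat : Nat) : Int) = L - 1 := by omega
    have hpos : t1 + L = (t1 + 1) + (((L - 1).toNat : Nat) : Int) := by omega
    rw [hpos, pvSeg L (L - 1).toNat (t1 + 1) d acc f (by omega)
      (fun j hj1 hj2 => by
        have hjn : j ∉ pvJ n L := pvNotMemJ_window n L hL t1 j ht1J (by omega) (by omega)
        rw [h2 j hjn])]
    have hf1 : 1 ≤ f := by
      have : 1 * L.toNat + 0 ≤ f + (L-1).toNat := le_trans (by omega) hf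
      omega
    obtain ⟨g, rfl⟩ : ∃ g, f = g + 1 := ⟨f - 1, by omega⟩
    rw [pvALoop, if_pos (by omega : t1 + 1 ≥ 1)]
    simp only [add_sub_cancel_right]
    rw [if_neg (by rw [hc]; omega)]
    rw [IH d _ g h1 h2 (by
      have : 1 * L.toNat + pvNeed L R t1N ≤ g + 1 + (L - 1).toNat := le_trans (by omega) hf
      omega)]
    rw [show t1 + 1 + (((L - 1).toNat : Nat) : Int) - 1 = t1 + L - 1 from by omega]
    rw [pvDesc_split t1 L hL]
    simp [pvRep]
  | succ c ihc =>
    intro d acc fuel hc h1 h2 hf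
    have hstep : L.toNat ≤ (c + 1 + 1) * L.toNat := Nat.le_mul_of_pos_left L.toNat (by omega)
    have hm : (L - 1).toNat ≤ fuel := by omega
    obtain ⟨f, rfl⟩ : ∃ f, fuel = f + (L - 1).toNat := ⟨fuel - (L - 1).toNat, by omega⟩
    have hpos : t1 + L = (t1 + 1) + (((L - 1).toNat : Nat) : Int) := by omega
    rw [hpos, pvSeg L (L - 1).toNat (t1 + 1) d acc f (by omega)
      (fun j hj1 hj2 => by
        have hjn : j ∉ pvJ n L := pvNotMemJ_window n L hL t1 j ht1J (by omega) (by omega)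
        rw [h2 j hjn])]
    have hf1 : 1 ≤ f := by omega
    obtain ⟨g, rfl⟩ : ∃ g, f = g + 1 := ⟨f - 1, by omega⟩
    rw [pvALoop, if_pos (by omega : t1 + 1 ≥ 1)]
    simp only [add_sub_cancel_right]
    rw [if_pos (by rw [hc]; push_cast; omega)]
    rw [pvClimbFold]
    rw [show ((L.toNat : Nat) : Int) = L from by omega]
    rw [ihc (d.insert t1 (d.getD t1 0 - 1)) _ g
      (by rw [PySem.Dict.getD_insert, if_pos rfl, hc]; push_cast; ring)
      (fun j hj => by rw [PySem.Dict.getD_insert, if_neg (by omega), h1 j hj])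
      (fun j hj => by
        rw [PySem.Dict.getD_insert, if_neg (show ¬ j = t1 from fun e => hj (by rw [e]; exact ht1J)), h2 j hj])
      (by
        have e : (c + 1 + 1) * L.toNat = (c + 1) * L.toNat + L.toNat := by ring
        omega)]
    rw [show t1 + 1 + (((L - 1).toNat : Nat) : Int) - 1 = t1 + L - 1 from by omega]
    rw [pvDesc_split t1 L hL, pvRep_succ]
    unfold pvBlock
    simp
    rw [pvDesc_split t1 L hL]
    simp

lemma pvJ_nil_of_neg (n L : Int) (hn : 1 ≤ n) (hL : L < 0) : pvJ n L = [] := by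
  unfold pvJ
  exact pvPyRange_nil_of_neg 0 (n - L) L hL (by omega)

lemma pvMain (n L R : Int) (hn : 1 ≤ n) (hL : L ≠ 0) :
    ∀ (tN : Nat) (d : PySem.Dict Int Int) (acc : List Int) (fuel : Nat),
      (∀ j : Int, j < (tN : Int) → d.getD j 0 = if j ∈ pvJ n L then R - 1 else 0) →
      (∀ j : Int, j ∉ pvJ n L → d.getD j 0 = 0) →
      pvNeed L R tN ≤ fuel →
      pvALoop L fuel (tN : Int) d acc = acc ++ pvBRec n L R tN := by
  intro tN
  induction tN with
  | zero =>
    intro d acc fuel _ _ _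
    cases fuel with
    | zero => simp [pvALoop, pvBRec]
    | succ f =>
      rw [pvALoop, if_neg (by omega)]
      simp [pvBRec]
  | succ tN ih =>
    intro d acc fuel h1 h2 hf
    have hX : pvNeed L R (tN + 1) = pvNeed L R tN + ((R - 1).toNat * L.toNat + 1) := by
      unfold pvNeed; ring
    have hfuel1 : 1 ≤ fuel := by omega
    obtain ⟨f, rfl⟩ : ∃ f, fuel = f + 1 := ⟨fuel - 1, by omega⟩
    rw [pvALoop, if_pos (by push_cast; omega)]
    have e : ((tN + 1 : Nat) : Int) - 1 = (tN : Int) := by push_cast; ring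
    simp only [e]
    have hget : d.getD (tN : Int) 0 = if (tN : Int) ∈ pvJ n L then R - 1 else 0 :=
      h1 _ (by push_cast; omega)
    by_cases hmem : (tN : Int) ∈ pvJ n L
    · by_cases hR : R - 1 > 0
      · -- trigger
        have hLpos : 0 < L := by
          rcases lt_trichotomy L 0 with h | h | h
          · rw [pvJ_nil_of_neg n L hn h] at hmem; simp at hmem
          · exact absurd h hL
          · exact h
        rw [if_pos (by rw [hget, if_pos hmem]; omega)]
        rw [pvClimbFold]
        rw [show ((L.toNat : Nat) : Int) = L from by omega]
        rw [pvSub n L R hLpos (tN : Int) tN rfl hmem ih (R - 2).toNat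
          (d.insert (tN : Int) (d.getD (tN : Int) 0 - 1)) _ f
          (by rw [PySem.Dict.getD_insert, if_pos rfl, hget, if_pos hmem]; omega)
          (fun j hj => by rw [PySem.Dict.getD_insert, if_neg (by omega), h1 j (by omega)])
          (fun j hj => by
            rw [PySem.Dict.getD_insert,
              if_neg (show ¬ j = (tN : Int) from fun e' => hj (by rw [e']; exact hmem)),
              h2 j hj])
          (by
            have e1 : ((R - 2).toNat + 1) = (R - 1).toNat := by omega
            have e2 : ((R - 2).toNat + 1) * L.toNat = (R - 1).toNat * L.toNat := by rw [e1]
            omega)]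
        rw [show pvBRec n L R (tN + 1)
            = ((tN : Int) :: (if (tN : Int) ∈ pvJ n L then pvRep (tN : Int) L (R - 1).toNat else []))
              ++ pvBRec n L R tN from rfl]
        rw [if_pos hmem]
        rw [show (R - 1).toNat = (R - 2).toNat + 1 from by omega, pvRep_succ]
        unfold pvBlock
        simp
      · -- jump point but no repeats
        rw [if_neg (by rw [hget, if_pos hmem]; omega)]
        rw [ih d _ f (fun j hj => h1 j (by omega)) h2 (by omega)]
        rw [show pvBRec n L R (tN + 1)
            = ((tN : Int) :: (if (tN : Int) ∈ pvJ n L then pvRep (tN : Int) L (R - 1).toNat else []))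
              ++ pvBRec n L R tN from rfl]
        rw [if_pos hmem]
        rw [show (R - 1).toNat = 0 from by omega]
        simp [pvRep]
    · rw [if_neg (by rw [hget, if_neg hmem]; omega)]
      rw [ih d _ f (fun j hj => h1 j (by omega)) h2 (by omega)]
      rw [show pvBRec n L R (tN + 1)
          = ((tN : Int) :: (if (tN : Int) ∈ pvJ n L then pvRep (tN : Int) L (R - 1).toNat else []))
            ++ pvBRec n L R tN from rfl]
      rw [if_neg hmem]
      simp

lemma pvA_eq_bRec (n L R : Int) (hn : 1 ≤ n) (hL : L ≠ 0) :
    schedule_jump_py n L R = pvBRec n L R n.toNat ++ [-1] := by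
  have hinv : ∀ x : Int,
      ((PySem.List.pyRange 0 (n - L) L).foldl
          (fun (d : PySem.Dict Int Int) j => d.insert j (R - 1)) PySem.Dict.empty).getD x 0
        = if x ∈ pvJ n L then R - 1 else 0 := by
    intro x
    rw [pvGetD_foldl_insert_const]
    unfold pvJ
    split_ifs <;> simp
  have hmain := pvMain n L R hn hL n.toNat _ [] (pvNeed L R n.toNat)
    (fun j _ => hinv j) (fun j hj => by rw [hinv j, if_neg hj]) le_rfl
  rw [show ((n.toNat : Nat) : Int) = n from by omega] at hmain
  simp only [schedule_jump_py]
  rw [show (n.toNat * ((R - 1).toNat * L.toNat + 1)) = pvNeed L R n.toNat from rfl]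
  rw [hmain]
  simp

lemma pvFlatConst (R : Int) (b : List Int) :
    (PySem.List.pyRange 0 (R - 1) 1).flatMap (fun _ => b)
      = (List.range (R - 1).toNat).flatMap (fun _ => b) := by
  rw [PySem.List.pyRange_one]
  rw [show (R - 1 - 0).toNat = (R - 1).toNat from by omega]
  induction (List.range (R - 1).toNat) with
  | nil => simp
  | cons x xs ih => simp_all

lemma pvBFold (n L R : Int) : ∀ (m : Nat) (acc : List Int),
    (PySem.List.pyRange ((m : Int) - 1) (-1) (-1)).foldl (fun acc t =>
        let acc1 := acc ++ [t]
        if PySem.Set.contains (PySem.Set.ofList (PySem.List.pyRange 0 (n - L) L)) t then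
          (PySem.List.pyRange 0 (R - 1) 1).foldl (fun acc2 _ =>
            (PySem.List.pyRange (t + L - 1) (t - 1) (-1)).foldl (fun a s => a ++ [s])
              ((PySem.List.pyRange (t + 1) (t + L + 1) 1).foldl (fun a s => a ++ [s]) acc2)) acc1
        else acc1) acc
      = acc ++ pvBRec n L R m := by
  intro m
  induction m with
  | zero =>
    intro acc
    rw [show ((0 : Nat) : Int) - 1 = -1 from by norm_num,
      PySem.List.pyRange_neg_one_eq_nil (by omega)]
    simp [pvBRec]
  | succ m ih =>
    intro acc
    rw [show ((m + 1 : Nat) : Int) - 1 = (m : Int) from by push_cast; ring,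
      PySem.List.pyRange_neg_one_cons (by omega : (-1 : Int) < (m : Int)),
      List.foldl_cons, ih]
    have hcontains : PySem.Set.contains (PySem.Set.ofList (PySem.List.pyRange 0 (n - L) L)) (m : Int)
        = decide ((m : Int) ∈ pvJ n L) := by
      simp [PySem.Set.contains, PySem.Set.mem_ofList, pvJ, List.contains_iff_mem]
    simp only [hcontains]
    by_cases hmem : (m : Int) ∈ pvJ n L
    · rw [if_pos (by simp [hmem])]
      simp only [PySem.List.foldl_append_singleton_eq_self, List.append_assoc]
      rw [PySem.List.foldl_append_eq_flatMap
        (g := fun _ => PySem.List.pyRange ((m : Int) + 1) ((m : Int) + L + 1) 1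
          ++ PySem.List.pyRange ((m : Int) + L - 1) ((m : Int) - 1) (-1))]
      rw [show pvBRec n L R (m + 1)
          = ((m : Int) :: (if (m : Int) ∈ pvJ n L then pvRep (m : Int) L (R - 1).toNat else []))
            ++ pvBRec n L R m from rfl]
      rw [if_pos hmem]
      rw [show pvRep (m : Int) L (R - 1).toNat
          = (List.range (R - 1).toNat).flatMap (fun _ => pvBlock (m : Int) L) from rfl]
      rw [← pvFlatConst]
      unfold pvBlock pvClimb pvDesc
      simp
    · rw [if_neg (by simp [hmem])]
      rw [show pvBRec n L R (m + 1)
          = ((m : Int) :: (if (m : Int) ∈ pvJ n L then pvRep (m : Int) L (R - 1).toNat else []))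
            ++ pvBRec n L R m from rfl]
      rw [if_neg hmem]
      simp

lemma pvB_eq_bRec (n L R : Int) (hn : 0 ≤ n) :
    schedule_jump_py_alt n L R = pvBRec n L R n.toNat ++ [-1] := by
  simp only [schedule_jump_py_alt]
  rw [show n - 1 = ((n.toNat : Nat) : Int) - 1 from by omega]
  rw [pvBFold n L R n.toNat []]
  simp

-- ===== VERDICT (by name: the statement is the Claim_ definition above) =====
theorem schedule_jump_py_spec : Claim_equal_schedule_jump_py := by
  intro n L R _ hpre
  unfold Spec_schedule_jump_py
  rw [pvA_eq_bRec n L R hpre.1 hpre.2, pvB_eq_bRec n L R (by have h := hpre.1; omega)]
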